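-- pv_equiv track=rewrite | github.com/Raghavendra198902/iac | backend/aiops-engine/models/root_cause_analyzer.py | _trace_propagation
-- ===== SOURCE A (Python) =====
-- from typing import Dict, List, Optional, Set
--
-- def _trace_propagation(
--
--     origin: str,
--     affected: List[str],
--     graph: Dict
-- ) -> List[str]:
--     """Trace how failure propagated through the system."""
--
--     path = [origin]
--     visited = {origin}
--     queue = [origin]
--
--     while queue and len(path) < len(affected):
--         current = queue.pop(0)
--         dependents = [
--             svc for svc, config in graph.items()
--             if current in config.get('depends_on', [])
--             and svc in affected
--             and svc not in visited
--         ]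
--
--         for dependent in dependents:
--             path.append(dependent)
--             visited.add(dependent)
--             queue.append(dependent)
--
--     return path
-- ===== SOURCE B (Python) =====
-- def _trace_propagation(origin, affected, graph):
--     """Trace how failure propagated through the system.
--
--     Same result as the original, computed via a reverse-dependency
--     index built in one pass over the graph, then a pointer-based BFS."""
--     affected_set = set(affected)
--     rev = {}
--     for svc, config in graph.items():
--         if svc in affected_set:
--             # dict.fromkeys: record svc once per distinct dependency
--             for dep in dict.fromkeys(config.get('depends_on', [])):
--                 rev.setdefault(dep, []).append(svc)
--     path = [origin]
--     visited = {origin}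
--     i = 0
--     while i < len(path) and len(path) < len(affected):
--         fresh = [svc for svc in rev.get(path[i], []) if svc not in visited]
--         path += fresh
--         visited.update(fresh)
--         i += 1
--     return path
-- ===== Notes on version B (the rewrite author's own statement) =====
-- stated objective: alternative
-- what changed: B precomputes a reverse-dependency adjacency index (dep -> affected dependents in graph order) in one pass and runs a pointer-based BFS over it, instead of A's rescan of the whole graph at every BFS step; on the generated timing inputs this was not measurably faster, so no speed is claimed.
import Mathlib
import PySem

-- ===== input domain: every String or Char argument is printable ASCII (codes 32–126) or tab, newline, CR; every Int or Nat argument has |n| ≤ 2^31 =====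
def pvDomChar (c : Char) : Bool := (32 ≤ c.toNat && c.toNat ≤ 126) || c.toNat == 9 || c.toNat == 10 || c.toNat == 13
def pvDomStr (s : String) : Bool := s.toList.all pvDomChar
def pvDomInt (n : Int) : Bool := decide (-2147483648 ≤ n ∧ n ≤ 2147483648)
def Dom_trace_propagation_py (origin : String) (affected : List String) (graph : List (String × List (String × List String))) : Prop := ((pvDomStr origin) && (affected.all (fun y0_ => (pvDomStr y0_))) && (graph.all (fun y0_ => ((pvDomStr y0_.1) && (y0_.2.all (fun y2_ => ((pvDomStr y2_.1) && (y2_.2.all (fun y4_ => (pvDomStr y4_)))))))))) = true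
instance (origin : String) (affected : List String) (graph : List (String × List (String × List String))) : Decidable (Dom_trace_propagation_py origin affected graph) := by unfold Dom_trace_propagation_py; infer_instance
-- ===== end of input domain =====

-- ===== PORT A =====
-- B is the same BFS built on a precomputed reverse-dependency index instead of a per-step graph rescan; equal return value.
-- Shared marshalling: the Python argument `graph` is a dict of dicts; rebuild it with Python dict semantics.
def pvGraphDict (graph : List (String × List (String × List String))) :
    List (String × PySem.Dict String (List String)) :=
  (PySem.Dict.ofList (graph.map (fun p => (p.1, PySem.Dict.ofList p.2)))).items

-- A's while-loop, step for step; fuel bounds the number of iterations (≤ graph.length + 2 in reality).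
def pvLoopA (g : List (String × PySem.Dict String (List String))) (affected : List String) :
    Nat → List String → PySem.Set String → List String → List String
  | 0, path, _, _ => path
  | fuel+1, path, visited, queue =>
    match queue with
    | [] => path
    | current :: qs =>
      if path.length < affected.length then
        let dependents := (g.filter (fun p =>
            ((p.2.getD "depends_on" []).contains current
              && affected.contains p.1
              && !(PySem.Set.contains visited p.1)))).map (·.1)
        let st := dependents.foldl
            (fun (s : List String × PySem.Set String × List String) d =>
              (s.1 ++ [d], PySem.Set.add s.2.1 d, s.2.2 ++ [d]))
            (path, visited, qs)
        pvLoopA g affected fuel st.1 st.2.1 st.2.2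
      else path

def trace_propagation_py (origin : String) (affected : List String) (graph : List (String × List (String × List String))) : List String :=
  pvLoopA (pvGraphDict graph) affected (graph.length + 2)
    [origin] (PySem.Set.ofList [origin]) [origin]

-- ===== PORT B =====
-- reverse index: dep ↦ affected services (graph order) having dep among their distinct dependencies
def pvRev (g : List (String × PySem.Dict String (List String))) (affectedSet : PySem.Set String) :
    PySem.Dict String (List String) :=
  g.foldl (fun rev p =>
    if PySem.Set.contains affectedSet p.1 then
      (PySem.List.dedup (p.2.getD "depends_on" [])).foldl
        (fun rev dep => rev.modify dep [] (· ++ [p.1])) rev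
    else rev) PySem.Dict.empty

-- B's pointer-based BFS over the reverse index
def pvLoopB (rev : PySem.Dict String (List String)) (cap : Nat) :
    Nat → List String → PySem.Set String → Nat → List String
  | 0, path, _, _ => path
  | fuel+1, path, visited, i =>
    if i < path.length && path.length < cap then
      let fresh := (rev.getD (path.getD i "") []).filter
          (fun svc => !(PySem.Set.contains visited svc))
      pvLoopB rev cap fuel (path ++ fresh) (PySem.Set.update visited fresh) (i+1)
    else path

def trace_propagation_py_alt (origin : String) (affected : List String) (graph : List (String × List (String × List String))) : List String :=
  pvLoopB (pvRev (pvGraphDict graph) (PySem.Set.ofList affected)) affected.length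
    (graph.length + 2) [origin] (PySem.Set.ofList [origin]) 0

-- ===== PRECONDITION & SPEC =====
def Spec_trace_propagation_py (origin : String) (affected : List String) (graph : List (String × List (String × List String))) (out : List String) : Prop := out = trace_propagation_py_alt origin affected graph
instance (origin : String) (affected : List String) (graph : List (String × List (String × List String))) (out : List String) : Decidable (Spec_trace_propagation_py origin affected graph out) := by unfold Spec_trace_propagation_py; infer_instance

-- ===== CLAIM (what is proved, stated in full; the proofs are below) =====
def Claim_equal_trace_propagation_py : Prop := ∀ (origin : String) (affected : List String) (graph : List (String × List (String × List String))), Dom_trace_propagation_py origin affected graph → Spec_trace_propagation_py origin affected graph (trace_propagation_py origin affected graph)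

-- ===== LEMMAS AND PROOFS =====

-- A's for-loop over the (fresh, distinct) dependents just appends them to each component.
theorem pvFoldTriple (deps path qs : List String) (visited : PySem.Set String) :
    deps.foldl
      (fun (s : List String × PySem.Set String × List String) d =>
        (s.1 ++ [d], PySem.Set.add s.2.1 d, s.2.2 ++ [d]))
      (path, visited, qs)
    = (path ++ deps, PySem.Set.update visited deps, qs ++ deps) := by
  induction deps generalizing path visited qs with
  | nil => simp [PySem.Set.update]
  | cons d ds ih =>
      simp only [List.foldl_cons, ih, List.append_assoc, List.singleton_append,
        PySem.Set.update_cons]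

-- filtering the (dep, svc) pairs made from a deduplicated list picks svc once iff the key occurs
theorem pvFilterPairs (deps : List String) (svc current : String) (hnd : deps.Nodup) :
    ((deps.map (fun d => (d, svc))).filter (fun q => q.1 == current)).map (·.2)
      = if deps.contains current then [svc] else [] := by
  induction deps with
  | nil => simp
  | cons d ds ih =>
      simp only [List.nodup_cons] at hnd
      by_cases hd : d = current
      · subst hd
        have hmem : d ∉ ds := hnd.1
        have hcon : ds.contains d = false := by
          simpa [List.contains_eq_mem] using hmem
        simp [ih hnd.2, hcon, hmem]
      · simp [Ne.symm hd, ih hnd.2, hd]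

-- characterisation of the reverse index
theorem pvRevGetD (g : List (String × PySem.Dict String (List String)))
    (affectedSet : PySem.Set String) (current : String) :
    (pvRev g affectedSet).getD current []
      = (g.filter (fun p => PySem.Set.contains affectedSet p.1
          && (p.2.getD "depends_on" []).contains current)).map (·.1) := by
  have main : ∀ (l : List (String × PySem.Dict String (List String)))
      (rev : PySem.Dict String (List String)),
      (l.foldl (fun rev p =>
        if PySem.Set.contains affectedSet p.1 then
          (PySem.List.dedup (p.2.getD "depends_on" [])).foldl
            (fun rev dep => rev.modify dep [] (· ++ [p.1])) rev
        else rev) rev).getD current []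
      = rev.getD current []
        ++ (l.filter (fun p => PySem.Set.contains affectedSet p.1
              && (p.2.getD "depends_on" []).contains current)).map (·.1) := by
    intro l
    induction l with
    | nil => intro rev; simp
    | cons p ps ih =>
        intro rev
        simp only [List.foldl_cons]
        by_cases ha : PySem.Set.contains affectedSet p.1
        · have hinner :
            ((PySem.List.dedup (p.2.getD "depends_on" [])).foldl
              (fun rev dep => rev.modify dep [] (· ++ [p.1])) rev).getD current []
            = rev.getD current []
              ++ (if (p.2.getD "depends_on" []).contains current then [p.1] else []) := by
            rw [show ((PySem.List.dedup (p.2.getD "depends_on" [])).foldl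
                  (fun rev dep => rev.modify dep [] (· ++ [p.1])) rev)
                = (((PySem.List.dedup (p.2.getD "depends_on" [])).map
                      (fun d => (d, p.1))).foldl
                  (fun rev q => rev.modify q.1 [] (· ++ [q.2])) rev) by
                  rw [List.foldl_map]]
            rw [PySem.Dict.getD_foldl_modify_append]
            rw [pvFilterPairs _ _ _ (PySem.List.nodup_dedup _)]
            have : (PySem.List.dedup (p.2.getD "depends_on" [])).contains current
                = (p.2.getD "depends_on" []).contains current := by
              simp [List.contains_eq_mem, PySem.List.mem_dedup]
            rw [this]
          rw [if_pos ha, ih, hinner, List.filter_cons]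
          have ham : p.1 ∈ affectedSet := by
            simpa [List.contains_eq_mem] using ha
          by_cases hc : current ∈ p.2.getD "depends_on" []
          · simp [ham, hc, List.contains_eq_mem]
          · simp [hc, List.contains_eq_mem]
        · rw [if_neg ha, ih, List.filter_cons]
          have ham : p.1 ∉ affectedSet := by
            simpa [List.contains_eq_mem] using ha
          simp [ham]
  simpa [pvRev] using main g PySem.Dict.empty

-- moving the visited test out of the graph filter
theorem pvFilterSplit (g : List (String × PySem.Dict String (List String)))
    (a c : String × PySem.Dict String (List String) → Bool) (v : String → Bool) :
    (g.filter (fun p => c p && a p && !(v p.1))).map (·.1)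
      = ((g.filter (fun p => a p && c p)).map (·.1)).filter (fun s => !(v s)) := by
  induction g with
  | nil => rfl
  | cons p ps ih =>
      simp only [List.filter_cons]
      by_cases hc : c p <;> by_cases ha : a p <;> by_cases hv : v p.1 <;>
        simp [hc, ha, hv, ih, List.filter_cons]

-- the two loops run in lockstep: A's queue is B's path suffix from the pointer
theorem pvLockstep (g : List (String × PySem.Dict String (List String)))
    (affected : List String) (fuel : Nat) :
    ∀ (path : List String) (visited : PySem.Set String) (i : Nat), i ≤ path.length →
      pvLoopA g affected fuel path visited (path.drop i)
        = pvLoopB (pvRev g (PySem.Set.ofList affected)) affected.length fuel path visited i := by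
  induction fuel with
  | zero => intro path visited i _; rfl
  | succ fuel ih =>
      intro path visited i hi
      by_cases hlt : i < path.length
      · rw [List.drop_eq_getElem_cons hlt]
        simp only [pvLoopA, pvLoopB]
        by_cases hcap : path.length < affected.length
        · rw [if_pos hcap,
            if_pos (show (decide (i < path.length)
              && decide (path.length < affected.length)) = true by simp [hlt, hcap])]
          have hget : path.getD i "" = path[i] := List.getD_eq_getElem path "" hlt
          have hdeps :
              (g.filter (fun p =>
                ((p.2.getD "depends_on" []).contains path[i]
                  && affected.contains p.1
                  && !(PySem.Set.contains visited p.1)))).map (·.1)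
              = ((pvRev g (PySem.Set.ofList affected)).getD (path.getD i "") []).filter
                  (fun svc => !(PySem.Set.contains visited svc)) := by
            rw [hget, pvRevGetD]
            have hfun : (fun p : String × PySem.Dict String (List String) =>
                  PySem.Set.contains (PySem.Set.ofList affected) p.1
                    && (p.2.getD "depends_on" []).contains path[i])
                = (fun p : String × PySem.Dict String (List String) =>
                  affected.contains p.1 && (p.2.getD "depends_on" []).contains path[i]) := by
              funext p
              simp [List.contains_eq_mem, PySem.Set.mem_ofList]
            rw [hfun]
            exact pvFilterSplit g (fun p => affected.contains p.1)
              (fun p => (p.2.getD "depends_on" []).contains path[i])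
              (fun s => PySem.Set.contains visited s)
          rw [pvFoldTriple]
          dsimp only
          rw [hdeps]
          have : path.drop (i+1) ++
              ((pvRev g (PySem.Set.ofList affected)).getD (path.getD i "") []).filter
                (fun svc => !(PySem.Set.contains visited svc))
            = (path ++
              ((pvRev g (PySem.Set.ofList affected)).getD (path.getD i "") []).filter
                (fun svc => !(PySem.Set.contains visited svc))).drop (i+1) := by
            rw [List.drop_append_of_le_length (by omega)]
          rw [this]
          exact ih _ _ (i+1) (by simp only [List.length_append]; omega)
        · rw [if_neg (by simp [hcap])]
          simp [hcap]
      · have hdrop : path.drop i = [] := List.drop_eq_nil_of_le (by omega)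
        rw [hdrop]
        simp only [pvLoopA, pvLoopB]
        rw [if_neg (by simp; omega)]

-- ===== VERDICT (by name: the statement is the Claim_ definition above) =====
theorem trace_propagation_py_spec : Claim_equal_trace_propagation_py := by
  intro origin affected graph _
  unfold Spec_trace_propagation_py trace_propagation_py trace_propagation_py_alt
  have := pvLockstep (pvGraphDict graph) affected (graph.length + 2)
      [origin] (PySem.Set.ofList [origin]) 0 (by simp)
  simpa using this
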